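-- pv_equiv track=rewrite | github.com/joshanashakya/dissertation | workspace/dataset/java-python/GeeksForGeeks/2520/A/2.py | min_elimination
-- ===== SOURCE A (Python) =====
-- def min_elimination(n, arr):
--
--     count = 0
--
--     # Stores the previous element
--     prev_val = arr[0]
--
--     # Stores the new value
--     for i in range (1, n):
--         curr_val = arr[i];
--
--         # Check if the previous and current
--         # values are of same parity
--         if (curr_val % 2 == prev_val % 2):
--             count = count + 1
--
--         # Previous value is now the current value
--         prev_val = curr_val
--
--
--     # Return the counter variable
--     return count
-- ===== SOURCE B (Python) =====
-- def min_elimination(n, arr):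
--     # Two staged passes over index lists: collect the positions (within the
--     # first n) of the odd and of the even elements; a same-parity adjacent pair
--     # is exactly a pair of consecutive indices inside one of these two lists.
--     odds = [i for i in range(n) if arr[i] % 2 != 0]
--     evens = [i for i in range(n) if arr[i] % 2 == 0]
--
--     def adj(pos):
--         return sum(1 for a, b in zip(pos, pos[1:]) if b - a == 1)
--
--     return adj(odds) + adj(evens)
-- ===== Notes on version B (the rewrite author's own statement) =====
-- stated objective: alternative
-- what changed: B never compares neighbouring elements' parities: it builds the index lists of odd and of even positions among the first n elements and counts, inside each index list, the pairs of consecutive integers (b-a==1); the two counts sum to A's per-neighbour same-parity counter.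
import Mathlib
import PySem

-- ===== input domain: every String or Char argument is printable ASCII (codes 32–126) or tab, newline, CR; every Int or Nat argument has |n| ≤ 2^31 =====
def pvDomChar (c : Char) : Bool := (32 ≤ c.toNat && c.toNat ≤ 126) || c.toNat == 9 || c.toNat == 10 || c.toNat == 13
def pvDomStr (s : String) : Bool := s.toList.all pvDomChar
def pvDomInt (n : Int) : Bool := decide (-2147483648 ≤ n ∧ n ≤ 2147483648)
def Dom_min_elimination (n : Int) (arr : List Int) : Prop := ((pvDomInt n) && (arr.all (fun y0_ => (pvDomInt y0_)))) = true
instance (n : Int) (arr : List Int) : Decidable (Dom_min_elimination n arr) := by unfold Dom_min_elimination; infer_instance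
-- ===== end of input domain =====

-- B replaces A's neighbour-parity comparison scan by index lists: the positions of odd
-- and of even elements among the first n, counting consecutive-index pairs in each
-- (objective: alternative algorithmic organisation, same O(n) cost).

-- ===== PORT A =====
-- literal port of A: prev_val = arr[0], then for i in range(1, n) compare parities.
def min_elimination (n : Int) (arr : List Int) : Int :=
  match PySem.List.pyGet? arr 0 with
  | none => 0          -- arr[0] raises IndexError (excluded by Pre_)
  | some p0 =>
    let st := (PySem.List.pyRange 1 n 1).foldl (fun (s : Int × Int) i =>
      match PySem.List.pyGet? arr i with
      | none => s      -- arr[i] raises IndexError (excluded by Pre_)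
      | some c => (if PySem.Int.mod c 2 = PySem.Int.mod s.2 2 then s.1 + 1 else s.1, c))
      (0, p0)
    st.1

-- ===== PORT B =====
-- literal port of Source B's helper adj: sum over zip(pos, pos[1:]) of 1 where b - a == 1.
def pvAdj (pos : List Int) : Int :=
  (pos.zip pos.tail).foldl (fun (c : Int) ab => if ab.2 - ab.1 = 1 then c + 1 else c) 0

-- literal port of Source B: index lists of odd / even positions among the first n, then adj.
def min_elimination_alt (n : Int) (arr : List Int) : Int :=
  let odds := (PySem.List.pyRange 0 n 1).filter (fun i =>
    match PySem.List.pyGet? arr i with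
    | some v => decide (PySem.Int.mod v 2 ≠ 0)
    | none => false)   -- arr[i] raises IndexError (excluded by Pre_)
  let evens := (PySem.List.pyRange 0 n 1).filter (fun i =>
    match PySem.List.pyGet? arr i with
    | some v => decide (PySem.Int.mod v 2 = 0)
    | none => false)   -- arr[i] raises IndexError (excluded by Pre_)
  pvAdj odds + pvAdj evens

-- ===== PRECONDITION & SPEC =====
-- Pre_ excludes exactly the inputs on which A raises IndexError: arr = [] (arr[0])
-- or n > len(arr) (arr[i] in the loop).
def Pre_min_elimination (n : Int) (arr : List Int) : Prop :=
  arr ≠ [] ∧ n ≤ arr.length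

instance (n : Int) (arr : List Int) : Decidable (Pre_min_elimination n arr) := by
  unfold Pre_min_elimination; infer_instance

def pvWitness_min_elimination : Int × List Int := (4, [1, 3, 2, 4])

def Spec_min_elimination (n : Int) (arr : List Int) (out : Int) : Prop := out = min_elimination_alt n arr
instance (n : Int) (arr : List Int) (out : Int) : Decidable (Spec_min_elimination n arr out) := by unfold Spec_min_elimination; infer_instance

-- ===== CLAIM (what is proved, stated in full; the proofs are below) =====
def Claim_equal_min_elimination : Prop := ∀ (n : Int) (arr : List Int), Dom_min_elimination n arr → Pre_min_elimination n arr → Spec_min_elimination n arr (min_elimination n arr)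

-- ===== LEMMAS AND PROOFS =====

-- number of same-parity adjacent pairs in (p :: t)
def pvCountP (p : Int) (t : List Int) : Int :=
  match t with
  | [] => 0
  | c :: t' => (if PySem.Int.mod c 2 = PySem.Int.mod p 2 then 1 else 0) + pvCountP c t'

-- positions (base k) of the elements of l satisfying pb
def pvPos (pb : Int → Bool) : Nat → List Int → List Int
  | _, [] => []
  | k, x :: l => if pb x then (k : Int) :: pvPos pb (k + 1) l else pvPos pb (k + 1) l

-- consecutive-difference-1 count of xs, seeded with a previous value j
def pvDcnt : Int → List Int → Int
  | _, [] => 0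
  | j, x :: xs => (if x - j = 1 then 1 else 0) + pvDcnt x xs

theorem pvFoldA (arr : List Int) :
    ∀ (k : Nat) (j acc prev : Int), 0 ≤ j → (j + k : Int) ≤ arr.length →
    ((PySem.List.pyRange j (j + k) 1).foldl (fun (s : Int × Int) i =>
      match PySem.List.pyGet? arr i with
      | none => s
      | some c => (if PySem.Int.mod c 2 = PySem.Int.mod s.2 2 then s.1 + 1 else s.1, c))
      (acc, prev)).1
    = acc + pvCountP prev ((arr.drop j.toNat).take k) := by
  intro k
  induction k with
  | zero =>
    intro j acc prev hj hlen
    rw [PySem.List.pyRange_one_eq_nil (by omega)]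
    simp [pvCountP]
  | succ k ih =>
    intro j acc prev hj hlen
    rw [PySem.List.pyRange_one_cons (by omega : j < j + (k + 1 : Nat))]
    have hjlt : j < (arr.length : Int) := by push_cast at hlen; omega
    have hget : PySem.List.pyGet? arr j = some arr[j.toNat] :=
      PySem.List.pyGet?_eq_some_getElem arr hj hjlt
    simp only [List.foldl_cons, hget]
    rw [show j + (((k + 1 : Nat)) : Int) = (j + 1) + ((k : Nat) : Int) by push_cast; ring]
    rw [ih (j + 1) _ _ (by omega) (by push_cast at hlen ⊢; omega)]
    have hdrop : arr.drop j.toNat = arr[j.toNat] :: arr.drop (j + 1).toNat := by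
      rw [show (j + 1).toNat = j.toNat + 1 by omega]
      exact List.drop_eq_getElem_cons (by omega)
    rw [hdrop, List.take_succ_cons]
    simp only [pvCountP]
    split_ifs <;> ring

-- the filter over range(k, k+len) computes pvPos over the corresponding slice of arr
theorem pvFilterPos (arr : List Int) (pb : Int → Bool) :
    ∀ (len k : Nat), ((k : Int) + len ≤ arr.length) →
    (PySem.List.pyRange k ((k : Int) + len) 1).filter (fun i =>
      match PySem.List.pyGet? arr i with
      | some v => pb v
      | none => false)
    = pvPos pb k ((arr.drop k).take len) := by
  intro len
  induction len with
  | zero =>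
    intro k hlen
    rw [PySem.List.pyRange_one_eq_nil (by omega)]
    simp [pvPos]
  | succ len ih =>
    intro k hlen
    rw [PySem.List.pyRange_one_cons (by push_cast; omega : (k : Int) < (k : Int) + (len + 1 : Nat))]
    have hklt : (k : Int) < (arr.length : Int) := by push_cast at hlen; omega
    have hget : PySem.List.pyGet? arr k = some arr[k] :=
      PySem.List.pyGet?_eq_some_getElem arr (by omega) (by simpa using hklt)
    rw [List.filter_cons]
    simp only [hget]
    have hrec : (PySem.List.pyRange ((k : Int) + 1) ((k : Int) + (len + 1 : Nat)) 1).filter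
        (fun i => match PySem.List.pyGet? arr i with | some v => pb v | none => false)
        = pvPos pb (k + 1) ((arr.drop (k + 1)).take len) := by
      have := ih (k + 1) (by push_cast at hlen ⊢; omega)
      rw [show ((k : Int) + (len + 1 : Nat)) = ((k + 1 : Nat) : Int) + len by push_cast; ring]
      simpa using this
    have hdrop : arr.drop k = arr[k] :: arr.drop (k + 1) :=
      List.drop_eq_getElem_cons (by simpa using hklt)
    rw [hdrop, List.take_succ_cons]
    simp only [pvPos]
    push_cast at hrec
    by_cases hpb : pb arr[k] <;> simp [hpb, hrec]

-- every position produced by pvPos is at least the base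
theorem pvPos_ge (pb : Int → Bool) :
    ∀ (l : List Int) (k : Nat) (x : Int), x ∈ pvPos pb k l → (k : Int) ≤ x := by
  intro l
  induction l with
  | nil => intro k x h; simp [pvPos] at h
  | cons a l ih =>
    intro k x h
    simp only [pvPos] at h
    by_cases hpb : pb a
    · rw [if_pos hpb] at h
      rcases List.mem_cons.mp h with h | h
      · omega
      · have := ih (k + 1) x h; push_cast at this ⊢; omega
    · rw [if_neg hpb] at h
      have := ih (k + 1) x h; push_cast at this ⊢; omega

-- the seed is irrelevant as long as it cannot form a difference-1 pair with the head
theorem pvDcnt_seed (xs : List Int) (j j' : Int)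
    (h : ∀ x ∈ xs.head?, x - j ≠ 1 ∧ x - j' ≠ 1) : pvDcnt j xs = pvDcnt j' xs := by
  cases xs with
  | nil => rfl
  | cons x xs =>
    have hx := h x (by simp)
    simp only [pvDcnt, if_neg hx.1, if_neg hx.2]

-- pvAdj is pvDcnt seeded with the head
theorem pvAdj_eq_dcnt :
    ∀ (t : List Int) (a acc : Int),
    ((a :: t).zip t).foldl (fun (c : Int) ab => if ab.2 - ab.1 = 1 then c + 1 else c) acc
      = acc + pvDcnt a t := by
  intro t
  induction t with
  | nil => intro a acc; simp [pvDcnt]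
  | cons x t ih =>
    intro a acc
    simp only [List.zip_cons_cons, List.foldl_cons, pvDcnt]
    rw [ih x]
    split_ifs <;> ring

theorem pvMod2 (x : Int) : PySem.Int.mod x 2 = 0 ∨ PySem.Int.mod x 2 = 1 := by
  have h1 := PySem.Int.mod_nonneg x (by norm_num : (0:Int) < 2)
  have h2 := PySem.Int.mod_lt x (by norm_num : (0:Int) < 2)
  omega

-- main invariant: dcnt over the two position lists equals the same-parity pair count
theorem pvInv :
    ∀ (l : List Int) (k : Nat) (po pe p : Int), 1 ≤ k →
    (if PySem.Int.mod p 2 = 0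
      then pe = (k : Int) - 1 ∧ po ≤ (k : Int) - 2
      else po = (k : Int) - 1 ∧ pe ≤ (k : Int) - 2) →
    pvDcnt po (pvPos (fun v => decide (PySem.Int.mod v 2 ≠ 0)) k l)
      + pvDcnt pe (pvPos (fun v => decide (PySem.Int.mod v 2 = 0)) k l)
    = pvCountP p l := by
  intro l
  induction l with
  | nil => intro k po pe p hk h; simp [pvPos, pvDcnt, pvCountP]
  | cons x l ih =>
    intro k po pe p hk h
    rcases pvMod2 x with hx | hx <;> rcases pvMod2 p with hp | hp
    · -- x even, p even: the pair is counted; evens gains position k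
      rw [hp, if_pos rfl] at h
      obtain ⟨h1, h2⟩ := h
      have e1 : pvPos (fun v => decide (PySem.Int.mod v 2 ≠ 0)) k (x :: l)
          = pvPos (fun v => decide (PySem.Int.mod v 2 ≠ 0)) (k + 1) l := by
        simp only [pvPos]; rw [if_neg]; simp only [decide_eq_true_eq, hx]; omega
      have e2 : pvPos (fun v => decide (PySem.Int.mod v 2 = 0)) k (x :: l)
          = (k : Int) :: pvPos (fun v => decide (PySem.Int.mod v 2 = 0)) (k + 1) l := by
        simp only [pvPos]; rw [if_pos]; simp only [decide_eq_true_eq, hx]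
      rw [e1, e2]
      simp only [pvDcnt, pvCountP, hx, hp]
      rw [if_pos trivial, if_pos (by omega : (k : Int) - pe = 1)]
      rw [← ih (k + 1) po (k : Int) x (by omega)
        (by rw [hx, if_pos rfl]; exact ⟨by push_cast; omega, by push_cast; omega⟩)]
      ring
    · -- x even, p odd: no pair; evens gains position k, pe ≤ k-2
      rw [hp, if_neg (by omega : ¬ ((1 : Int) = 0))] at h
      obtain ⟨h1, h2⟩ := h
      have e1 : pvPos (fun v => decide (PySem.Int.mod v 2 ≠ 0)) k (x :: l)
          = pvPos (fun v => decide (PySem.Int.mod v 2 ≠ 0)) (k + 1) l := by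
        simp only [pvPos]; rw [if_neg]; simp only [decide_eq_true_eq, hx]; omega
      have e2 : pvPos (fun v => decide (PySem.Int.mod v 2 = 0)) k (x :: l)
          = (k : Int) :: pvPos (fun v => decide (PySem.Int.mod v 2 = 0)) (k + 1) l := by
        simp only [pvPos]; rw [if_pos]; simp only [decide_eq_true_eq, hx]
      rw [e1, e2]
      simp only [pvDcnt, pvCountP, hx, hp]
      rw [if_neg (by omega : ¬ ((0 : Int) = 1)), if_neg (by omega : ¬ ((k : Int) - pe = 1))]
      rw [← ih (k + 1) po (k : Int) x (by omega)
        (by rw [hx, if_pos rfl]; exact ⟨by push_cast; omega, by push_cast; omega⟩)]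
      ring
    · -- x odd, p even: no pair; odds gains position k, po ≤ k-2
      rw [hp, if_pos rfl] at h
      obtain ⟨h1, h2⟩ := h
      have e1 : pvPos (fun v => decide (PySem.Int.mod v 2 ≠ 0)) k (x :: l)
          = (k : Int) :: pvPos (fun v => decide (PySem.Int.mod v 2 ≠ 0)) (k + 1) l := by
        simp only [pvPos]; rw [if_pos]; simp only [decide_eq_true_eq, hx]; omega
      have e2 : pvPos (fun v => decide (PySem.Int.mod v 2 = 0)) k (x :: l)
          = pvPos (fun v => decide (PySem.Int.mod v 2 = 0)) (k + 1) l := by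
        simp only [pvPos]; rw [if_neg]; simp only [decide_eq_true_eq, hx]; omega
      rw [e1, e2]
      simp only [pvDcnt, pvCountP, hx, hp]
      rw [if_neg (by omega : ¬ ((1 : Int) = 0)), if_neg (by omega : ¬ ((k : Int) - po = 1))]
      rw [← ih (k + 1) (k : Int) pe x (by omega)
        (by rw [hx, if_neg (by omega : ¬ ((1 : Int) = 0))]
            exact ⟨by push_cast; omega, by push_cast; omega⟩)]
      ring
    · -- x odd, p odd: the pair is counted; odds gains position k
      rw [hp, if_neg (by omega : ¬ ((1 : Int) = 0))] at h
      obtain ⟨h1, h2⟩ := h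
      have e1 : pvPos (fun v => decide (PySem.Int.mod v 2 ≠ 0)) k (x :: l)
          = (k : Int) :: pvPos (fun v => decide (PySem.Int.mod v 2 ≠ 0)) (k + 1) l := by
        simp only [pvPos]; rw [if_pos]; simp only [decide_eq_true_eq, hx]; omega
      have e2 : pvPos (fun v => decide (PySem.Int.mod v 2 = 0)) k (x :: l)
          = pvPos (fun v => decide (PySem.Int.mod v 2 = 0)) (k + 1) l := by
        simp only [pvPos]; rw [if_neg]; simp only [decide_eq_true_eq, hx]; omega
      rw [e1, e2]
      simp only [pvDcnt, pvCountP, hx, hp]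
      rw [if_pos trivial, if_pos (by omega : (k : Int) - po = 1)]
      rw [← ih (k + 1) (k : Int) pe x (by omega)
        (by rw [hx, if_neg (by omega : ¬ ((1 : Int) = 0))]
            exact ⟨by push_cast; omega, by push_cast; omega⟩)]
      ring

-- pvAdj of a position list equals pvDcnt with any seed ≤ base - 2
theorem pvAdj_pos (pb : Int → Bool) (k : Nat) (l : List Int) (j : Int) (hj : j ≤ (k : Int) - 2) :
    pvAdj (pvPos pb k l) = pvDcnt j (pvPos pb k l) := by
  unfold pvAdj
  cases hpos : pvPos pb k l with
  | nil => simp [pvDcnt]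
  | cons a t =>
    have ha : (k : Int) ≤ a := pvPos_ge pb l k a (by rw [hpos]; simp)
    simp only [List.tail_cons]
    rw [pvAdj_eq_dcnt t a 0]
    rw [pvDcnt_seed (a :: t) j a ?_]
    · simp only [pvDcnt]
      rw [if_neg (by omega : ¬ (a - a = 1))]
      try ring
    · intro x hx
      simp only [List.head?_cons, Option.mem_def, Option.some.injEq] at hx
      subst hx
      constructor <;> omega

-- ===== VERDICT (by name: the statement is the Claim_ definition above) =====
theorem min_elimination_spec : Claim_equal_min_elimination := by
  intro n arr _ hpre
  obtain ⟨hne, hlen⟩ := hpre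
  unfold Spec_min_elimination min_elimination min_elimination_alt
  match arr, hne with
  | x0 :: rest, _ =>
  simp only [PySem.List.pyGet?_zero_cons]
  by_cases hn : n ≤ 0
  · rw [PySem.List.pyRange_one_eq_nil (by omega : n ≤ 1),
        PySem.List.pyRange_one_eq_nil (by omega : n ≤ 0)]
    simp [pvAdj]
  · replace hn := lt_of_not_ge (fun h => hn h)
    -- A side
    have hk : (1 : Int) + ((n - 1).toNat : Int) = n := by omega
    have hA := pvFoldA (x0 :: rest) (n - 1).toNat 1 0 x0 (by norm_num)
      (by rw [hk]; exact hlen)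
    rw [hk] at hA
    simp only [show ((1 : Int)).toNat = 1 from rfl, List.drop_succ_cons, List.drop_zero] at hA
    rw [hA]
    -- B side: both filters over range(0, n)
    set t := rest.take (n - 1).toNat with ht
    have htake : ((x0 :: rest).drop (0 : Nat)).take n.toNat = x0 :: t := by
      rw [List.drop_zero, show n.toNat = (n - 1).toNat + 1 by omega, List.take_succ_cons]
    have hrange : ∀ pb : Int → Bool,
        (PySem.List.pyRange 0 n 1).filter (fun i =>
          match PySem.List.pyGet? (x0 :: rest) i with
          | some v => pb v
          | none => false)
        = pvPos pb 0 (x0 :: t) := by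
      intro pb
      have := pvFilterPos (x0 :: rest) pb n.toNat 0
        (by push_cast; omega)
      rw [show ((0 : Nat) : Int) + (n.toNat : Int) = n by omega] at this
      rw [htake] at this
      simpa using this
    rw [hrange, hrange]
    -- unfold one step of pvPos at position 0 and apply the invariant
    rcases pvMod2 x0 with hx0 | hx0
    · have hodds : pvPos (fun v => decide (PySem.Int.mod v 2 ≠ 0)) 0 (x0 :: t)
          = pvPos (fun v => decide (PySem.Int.mod v 2 ≠ 0)) 1 t := by
        simp only [pvPos]
        rw [if_neg (by simp only [decide_eq_true_eq, hx0]; omega)]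
      have hevens : pvPos (fun v => decide (PySem.Int.mod v 2 = 0)) 0 (x0 :: t)
          = (0 : Int) :: pvPos (fun v => decide (PySem.Int.mod v 2 = 0)) 1 t := by
        simp only [pvPos]
        rw [if_pos (by simp only [decide_eq_true_eq, hx0])]
        norm_num
      rw [hodds, hevens]
      rw [pvAdj_pos _ 1 t (-2) (by norm_num)]
      have hAdjE : pvAdj ((0 : Int) :: pvPos (fun v => decide (PySem.Int.mod v 2 = 0)) 1 t)
          = pvDcnt 0 (pvPos (fun v => decide (PySem.Int.mod v 2 = 0)) 1 t) := by
        unfold pvAdj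
        simp only [List.tail_cons]
        rw [pvAdj_eq_dcnt]; ring
      rw [hAdjE]
      rw [pvInv t 1 (-2) 0 x0 (by omega)
        (by rw [hx0, if_pos rfl]; exact ⟨by norm_num, by norm_num⟩)]
      omega
    · have hodds : pvPos (fun v => decide (PySem.Int.mod v 2 ≠ 0)) 0 (x0 :: t)
          = (0 : Int) :: pvPos (fun v => decide (PySem.Int.mod v 2 ≠ 0)) 1 t := by
        simp only [pvPos]
        rw [if_pos (by simp only [decide_eq_true_eq, hx0]; omega)]
        norm_num
      have hevens : pvPos (fun v => decide (PySem.Int.mod v 2 = 0)) 0 (x0 :: t)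
          = pvPos (fun v => decide (PySem.Int.mod v 2 = 0)) 1 t := by
        simp only [pvPos]
        rw [if_neg (by simp only [decide_eq_true_eq, hx0]; omega)]
      rw [hodds, hevens]
      rw [pvAdj_pos _ 1 t (-2) (by norm_num)]
      have hAdjO : pvAdj ((0 : Int) :: pvPos (fun v => decide (PySem.Int.mod v 2 ≠ 0)) 1 t)
          = pvDcnt 0 (pvPos (fun v => decide (PySem.Int.mod v 2 ≠ 0)) 1 t) := by
        unfold pvAdj
        simp only [List.tail_cons]
        rw [pvAdj_eq_dcnt]; ring
      rw [hAdjO]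
      rw [pvInv t 1 0 (-2) x0 (by omega)
        (by rw [hx0, if_neg (by omega : ¬ ((1 : Int) = 0))]
            exact ⟨by norm_num, by norm_num⟩)]
      omega
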